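-- pv_equiv track=rewrite | github.com/dprgarner/codejam | python/2020/Q_nesting.py | get_blocks
-- ===== SOURCE A (Python) =====
-- def get_blocks(min_digit, chars):
--     bool_or_nones = [None if x in ("(", ")") else (x >= min_digit) for x in chars]
--
--     blocks = []
--     end_block = None
--     for idx in range(len(bool_or_nones) - 1, -1, -1):
--         relevant = bool_or_nones[idx]
--         if relevant == None:
--             continue
--
--         if relevant and end_block != None:
--             continue
--         elif not relevant and end_block == None:
--             continue
--         elif relevant and end_block == None:
--             end_block = idx + 1
--         elif not relevant and end_block != None:
--             blocks.append((idx + 1, end_block))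
--             end_block = None
--
--     if end_block:
--         blocks.append((0, end_block))
--     return blocks
-- ===== SOURCE B (Python) =====
-- def get_blocks(min_digit, chars):
--     status = [None if x in ("(", ")") else x >= min_digit for x in chars]
--     n = len(status)
--     # separator indices (status exactly False), with virtual bounds -1 and n
--     bounds = [-1] + [i for i, s in enumerate(status) if s is False] + [n]
--     blocks = []
--     for k in range(len(bounds) - 2, -1, -1):
--         lo, hi = bounds[k], bounds[k + 1]
--         trues = [j for j in range(lo + 1, hi) if status[j] is True]
--         if trues:
--             blocks.append((lo + 1, trues[-1] + 1))
--     return blocks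
-- ===== Notes on version B (the rewrite author's own statement) =====
-- stated objective: alternative
-- what changed: A is a single right-to-left stateful scan carrying an open block end in a mutable variable; B instead collects the separator indices (status exactly False) bounded by -1 and n, forms the segments between consecutive separators, and emits one block per segment that contains a True (rightmost True gives the block end), iterating the segments right-to-left.
import Mathlib
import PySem

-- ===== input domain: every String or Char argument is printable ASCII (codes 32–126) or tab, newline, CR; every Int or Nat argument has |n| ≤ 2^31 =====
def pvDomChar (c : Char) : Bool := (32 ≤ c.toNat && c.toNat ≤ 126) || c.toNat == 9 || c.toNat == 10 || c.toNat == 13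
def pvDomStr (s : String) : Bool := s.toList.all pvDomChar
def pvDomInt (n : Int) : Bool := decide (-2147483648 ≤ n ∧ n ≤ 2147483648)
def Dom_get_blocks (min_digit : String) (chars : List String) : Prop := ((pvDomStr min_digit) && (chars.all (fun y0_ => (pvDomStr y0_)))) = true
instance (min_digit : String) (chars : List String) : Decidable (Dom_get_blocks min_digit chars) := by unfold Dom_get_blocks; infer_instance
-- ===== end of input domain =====

-- B replaces A's single right-to-left stateful scan by a separator/segment decomposition:
-- separator indices (status exactly False) bounded by -1 and n, one block per segment that
-- contains a True, segments visited right-to-left (objective: alternative decomposition, same cost).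

-- Python's lexicographic string comparison:  x >= y  ⟺  pyStrLe y.toList x.toList  (exact on code points)
def pyStrLe : List Char → List Char → Bool
  | [], _ => true
  | _ :: _, [] => false
  | a :: as, b :: bs => if a < b then true else if b < a then false else pyStrLe as bs

-- ===== PORT A =====
-- loop body of A; state = (blocks, end_block); the five cases follow Python's branch chain in order
def pvStepA (idx : Int) (st : List (Int × Int) × Option Int) (relevant : Option Bool) :
    List (Int × Int) × Option Int :=
  match relevant, st.2 with
  | none, _ => st                                         -- relevant == None: continue
  | some true, some _ => st                               -- relevant and end_block != None: continue
  | some false, none => st                                -- not relevant and end_block == None: continue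
  | some true, none => (st.1, some (idx + 1))             -- end_block = idx + 1
  | some false, some e => (st.1 ++ [(idx + 1, e)], none)  -- blocks.append((idx+1, end_block))

def get_blocks (min_digit : String) (chars : List String) : List (Int × Int) :=
  let bool_or_nones : List (Option Bool) :=
    chars.map (fun x => if x = "(" ∨ x = ")" then none else some (pyStrLe min_digit.toList x.toList))
  -- for idx in range(len(bool_or_nones) - 1, -1, -1): …  (idx is always in range, so pyGetD is exact)
  let st := (PySem.List.pyRange ((bool_or_nones.length : Int) - 1) (-1) (-1)).foldl
    (fun st idx => pvStepA idx st (PySem.List.pyGetD bool_or_nones idx none)) ([], none)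
  match st.2 with
  | some e => if e = 0 then st.1 else st.1 ++ [(0, e)]    -- `if end_block:` (int truthiness)
  | none => st.1

-- ===== PORT B =====
-- [i for i, s in enumerate(status) if s is False]
def pvFalseIdx (status : List (Option Bool)) : List Int :=
  (PySem.List.enumerate status 0).filterMap (fun p => if p.2 = some false then some p.1 else none)

-- loop body of B: trues = [j for j in range(lo+1, hi) if status[j] is True];
-- if trues: emit (lo+1, trues[-1]+1)   (all j accessed are in range, so pyGetD is exact)
def pvEmitB (status : List (Option Bool)) (lo hi : Int) : List (Int × Int) :=
  let trues := (PySem.List.pyRange (lo + 1) hi 1).filter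
    (fun j => PySem.List.pyGetD status j none == some true)
  match trues.getLast? with
  | some j => [(lo + 1, j + 1)]
  | none => []

def get_blocks_alt (min_digit : String) (chars : List String) : List (Int × Int) :=
  let status : List (Option Bool) :=
    chars.map (fun x => if x = "(" ∨ x = ")" then none else some (pyStrLe min_digit.toList x.toList))
  let bounds : List Int := -1 :: pvFalseIdx status ++ [(status.length : Int)]
  -- for k in range(len(bounds) - 2, -1, -1): …  (bounds[k], bounds[k+1] always in range)
  (PySem.List.pyRange ((bounds.length : Int) - 2) (-1) (-1)).foldl
    (fun blocks k =>
      blocks ++ pvEmitB status (PySem.List.pyGetD bounds k 0) (PySem.List.pyGetD bounds (k + 1) 0))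
    []

-- ===== PRECONDITION & SPEC =====
def Spec_get_blocks (min_digit : String) (chars : List String) (out : List (Int × Int)) : Prop := out = get_blocks_alt min_digit chars
instance (min_digit : String) (chars : List String) (out : List (Int × Int)) : Decidable (Spec_get_blocks min_digit chars out) := by unfold Spec_get_blocks; infer_instance

-- ===== CLAIM (what is proved, stated in full; the proofs are below) =====
def Claim_equal_get_blocks : Prop := ∀ (min_digit : String) (chars : List String), Dom_get_blocks min_digit chars → Spec_get_blocks min_digit chars (get_blocks min_digit chars)

-- ===== LEMMAS AND PROOFS =====

-- the status list both ports build first (same expression in both)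
def statusOf (min_digit : String) (chars : List String) : List (Option Bool) :=
  chars.map (fun x => if x = "(" ∨ x = ")" then none else some (pyStrLe min_digit.toList x.toList))

-- A's scan, structurally: process the list right-to-left, element at offset `off` handled last
def goA : List (Option Bool) → Int → List (Int × Int) × Option Int → List (Int × Int) × Option Int
  | [], _, st => st
  | s :: t, off, st => pvStepA off (goA t (off + 1) st) s

-- A's final `if end_block:` step
def finA (st : List (Int × Int) × Option Int) : List (Int × Int) :=
  match st.2 with
  | some e => if e = 0 then st.1 else st.1 ++ [(0, e)]
  | none => st.1

-- indices (relative) of the `some true` entries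
def trueIdxN : List (Option Bool) → List Nat
  | [] => []
  | s :: t => (if s = some true then [0] else []) ++ (trueIdxN t).map (· + 1)

def lastT (seg : List (Option Bool)) : Option Nat := (trueIdxN seg).getLast?

-- the one optional block a segment contributes
def optB (seg : List (Option Bool)) (start : Int) : List (Int × Int) :=
  match lastT seg with
  | some j => [(start, start + (j : Int) + 1)]
  | none => []

-- B's loop, structurally: consecutive bound pairs, rightmost pair first
def goB (status : List (Option Bool)) : List Int → List (Int × Int)
  | lo :: hi :: rest => goB status (hi :: rest) ++ pvEmitB status lo hi
  | _ => []

-- pvFalseIdx with an arbitrary enumeration start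
def fIdxFrom (l : List (Option Bool)) (k : Int) : List Int :=
  (PySem.List.enumerate l k).filterMap (fun p => if p.2 = some false then some p.1 else none)

def Ares (l : List (Option Bool)) : List (Int × Int) := finA (goA l 0 ([], none))

def Bres (l : List (Option Bool)) : List (Int × Int) :=
  goB l (-1 :: fIdxFrom l 0 ++ [(l.length : Int)])

theorem goA_append (u v : List (Option Bool)) (off : Int) (st : List (Int × Int) × Option Int) :
    goA (u ++ v) off st = goA u off (goA v (off + u.length) st) := by
  induction u generalizing off with
  | nil => simp [goA]
  | cons a u ih =>
      show pvStepA off (goA (u ++ v) (off + 1) st) a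
          = pvStepA off (goA u (off + 1) (goA v (off + ((a :: u).length : Int)) st)) a
      rw [ih (off + 1)]
      rw [show off + 1 + (u.length : Int) = off + ((a :: u).length : Int) from by
        push_cast [List.length_cons]; ring]

theorem pvStepA_acc (off : Int) (bs B : List (Int × Int)) (E : Option Int) (s : Option Bool) :
    pvStepA off (bs ++ B, E) s = (bs ++ (pvStepA off (B, E) s).1, (pvStepA off (B, E) s).2) := by
  cases s with
  | none => simp [pvStepA]
  | some b => cases b <;> rcases E with _ | e <;> simp [pvStepA]

theorem goA_acc (l : List (Option Bool)) (off : Int) (bs : List (Int × Int)) (eb : Option Int) :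
    goA l off (bs, eb) = (bs ++ (goA l off ([], eb)).1, (goA l off ([], eb)).2) := by
  induction l generalizing off with
  | nil => simp [goA]
  | cons s t ih =>
      simp only [goA, ih (off + 1)]
      rw [pvStepA_acc]

theorem lastT_cons (s : Option Bool) (t : List (Option Bool)) :
    lastT (s :: t) = (match lastT t with
      | some j => some (j + 1)
      | none => if s = some true then some 0 else none) := by
  simp only [lastT]
  rw [show trueIdxN (s :: t) = (if s = some true then [0] else []) ++ (trueIdxN t).map (· + 1)
    from rfl]
  rw [List.getLast?_append, List.getLast?_map]
  rcases ht : (trueIdxN t).getLast? with _ | j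
  · by_cases hs : s = some true <;> simp [hs]
  · simp

theorem goA_noFalse (seg : List (Option Bool)) (off : Int) (bs : List (Int × Int))
    (h : some false ∉ seg) :
    goA seg off (bs, none) = (bs, (lastT seg).map (fun j : Nat => off + (j : Int) + 1)) := by
  induction seg generalizing off with
  | nil => simp [goA, lastT, trueIdxN]
  | cons s t ih =>
      have hs : s ≠ some false := fun hs => h (by simp [hs])
      have ht : some false ∉ t := fun hm => h (by simp [hm])
      simp only [goA, ih (off + 1) ht, lastT_cons]
      rcases hl : lastT t with _ | j
      · cases s with
        | none => simp [pvStepA]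
        | some b =>
            cases b
            · simp at hs
            · simp [pvStepA]
      · cases s with
        | none =>
            simp only [Option.map_some, pvStepA, Prod.mk.injEq, Option.some.injEq, true_and]
            push_cast
            ring
        | some b =>
            cases b
            · simp at hs
            · simp only [Option.map_some, pvStepA, Prod.mk.injEq, Option.some.injEq, true_and]
              push_cast
              ring

theorem finA_append (bs0 bs : List (Int × Int)) (eb : Option Int) :
    finA (bs0 ++ bs, eb) = bs0 ++ finA (bs, eb) := by
  rcases eb with _ | e
  · rfl
  · simp only [finA]
    by_cases he : e = 0 <;> simp [he]

theorem pvGetD_append_lt {α : Type} (L1 L2 : List α) (d : α) (i : Int)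
    (h0 : 0 ≤ i) (h1 : i < (L1.length : Int)) :
    PySem.List.pyGetD (L1 ++ L2) i d = PySem.List.pyGetD L1 i d := by
  rw [PySem.List.pyGetD_eq_getElem (L1 ++ L2) d h0 (by simp; omega),
      PySem.List.pyGetD_eq_getElem L1 d h0 h1]
  exact List.getElem_append_left (by omega)

-- ===== A-side bridge: the port's fold equals goA =====
theorem bridgeA (l : List (Option Bool)) (st : List (Int × Int) × Option Int) :
    (PySem.List.pyRange ((l.length : Int) - 1) (-1) (-1)).foldl
      (fun st idx => pvStepA idx st (PySem.List.pyGetD l idx none)) st = goA l 0 st := by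
  induction l using List.reverseRecOn generalizing st with
  | nil => simp [goA]
  | append_singleton u s ih =>
      have hlen : (((u ++ [s]).length : Int)) - 1 = (u.length : Int) := by
        simp
      rw [hlen, PySem.List.pyRange_neg_one_cons (by omega : (-1 : Int) < (u.length : Int)),
        List.foldl_cons]
      have hget : PySem.List.pyGetD (u ++ [s]) (u.length : Int) none = s := by
        rw [PySem.List.pyGetD_natCast]
        simp [List.getD]
      rw [hget]
      have hcong : (PySem.List.pyRange ((u.length : Int) - 1) (-1) (-1)).foldl
          (fun st idx => pvStepA idx st (PySem.List.pyGetD (u ++ [s]) idx none))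
          (pvStepA (u.length : Int) st s)
          = (PySem.List.pyRange ((u.length : Int) - 1) (-1) (-1)).foldl
          (fun st idx => pvStepA idx st (PySem.List.pyGetD u idx none))
          (pvStepA (u.length : Int) st s) := by
        apply PySem.List.foldl_congr_mem
        intro acc idx hid
        rw [PySem.List.mem_pyRange_neg_one] at hid
        have h0 : 0 ≤ idx := by omega
        have h1 : idx < ((u ++ [s]).length : Int) := by simp; omega
        have h2 : idx < (u.length : Int) := by omega
        rw [PySem.List.pyGetD_eq_getElem (u ++ [s]) none h0 h1,
            PySem.List.pyGetD_eq_getElem u none h0 h2]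
        congr 1
        exact List.getElem_append_left (by omega)
      rw [hcong, ih, goA_append]
      simp [goA]

-- ===== B-side lemmas =====
theorem goB_append_last (status : List (Option Bool)) (u : List Int) (h : u ≠ []) (a : Int) :
    goB status (u ++ [a]) = pvEmitB status (u.getLast h) a ++ goB status u := by
  induction u with
  | nil => exact absurd rfl h
  | cons x u ih =>
      cases u with
      | nil => simp [goB]
      | cons y r =>
          have hgl : (x :: y :: r).getLast h = (y :: r).getLast (by simp) :=
            List.getLast_cons (by simp)
          rw [hgl]
          rw [show (x :: y :: r) ++ [a] = x :: ((y :: r) ++ [a]) from by simp]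
          rw [show goB status (x :: ((y :: r) ++ [a]))
              = goB status ((y :: r) ++ [a]) ++ pvEmitB status x y from rfl]
          rw [ih (by simp)]
          rw [show goB status (x :: y :: r) = goB status (y :: r) ++ pvEmitB status x y from rfl]
          rw [List.append_assoc]

theorem emitB_restrict (l1 rest : List (Option Bool)) (lo hi : Int)
    (hlo : -1 ≤ lo) (hhi : hi ≤ (l1.length : Int)) :
    pvEmitB (l1 ++ rest) lo hi = pvEmitB l1 lo hi := by
  unfold pvEmitB
  have hfil : (PySem.List.pyRange (lo + 1) hi).filter
      (fun j => PySem.List.pyGetD (l1 ++ rest) j none == some true)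
      = (PySem.List.pyRange (lo + 1) hi).filter
      (fun j => PySem.List.pyGetD l1 j none == some true) := by
    apply List.filter_congr
    intro j hj
    rw [PySem.List.mem_pyRange_one] at hj
    rw [pvGetD_append_lt l1 rest none j (by omega) (by omega)]
  rw [hfil]

theorem goB_restrict (l1 rest : List (Option Bool)) (bs : List Int)
    (h : ∀ x ∈ bs, -1 ≤ x ∧ x ≤ (l1.length : Int)) :
    goB (l1 ++ rest) bs = goB l1 bs := by
  induction bs with
  | nil => rfl
  | cons lo bs ih =>
      cases bs with
      | nil => rfl
      | cons hi r =>
          show goB (l1 ++ rest) (hi :: r) ++ pvEmitB (l1 ++ rest) lo hi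
              = goB l1 (hi :: r) ++ pvEmitB l1 lo hi
          rw [ih (fun x hx => h x (List.mem_cons_of_mem _ hx)),
              emitB_restrict l1 rest lo hi (h lo (by simp)).1 (h hi (by simp)).2]

theorem fIdxFrom_nil (k : Int) : fIdxFrom [] k = [] := rfl

theorem fIdxFrom_cons (s : Option Bool) (t : List (Option Bool)) (k : Int) :
    fIdxFrom (s :: t) k = (if s = some false then [k] else []) ++ fIdxFrom t (k + 1) := by
  unfold fIdxFrom
  rw [PySem.List.enumerate_cons, List.filterMap_cons]
  by_cases hs : s = some false <;> simp [hs]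

theorem fIdxFrom_noFalse (l : List (Option Bool)) (k : Int) (h : some false ∉ l) :
    fIdxFrom l k = [] := by
  induction l generalizing k with
  | nil => rfl
  | cons s t ih =>
      have hs : s ≠ some false := fun hs => h (by simp [hs])
      rw [fIdxFrom_cons]
      simp [hs, ih (k + 1) (fun hm => h (by simp [hm]))]

theorem fIdxFrom_append (u v : List (Option Bool)) (k : Int) :
    fIdxFrom (u ++ v) k = fIdxFrom u k ++ fIdxFrom v (k + u.length) := by
  induction u generalizing k with
  | nil => simp [fIdxFrom_nil]
  | cons s t ih =>
      simp only [List.cons_append, fIdxFrom_cons, ih (k + 1), List.append_assoc]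
      rw [show k + 1 + (t.length : Int) = k + ((s :: t).length : Int) from by
        push_cast [List.length_cons]; ring]

theorem fIdxFrom_mem (l : List (Option Bool)) (k x : Int) (h : x ∈ fIdxFrom l k) :
    k ≤ x ∧ x < k + l.length := by
  induction l generalizing k with
  | nil => simp [fIdxFrom_nil] at h
  | cons s t ih =>
      rw [fIdxFrom_cons] at h
      rcases List.mem_append.mp h with h1 | h2
      · have hx : x = k := by
          by_cases hs : s = some false
          · simpa [hs] using h1
          · simp [hs] at h1
        subst hx
        refine ⟨le_refl _, ?_⟩
        simp only [List.length_cons]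
        push_cast
        omega
      · have h3 := ih (k + 1) h2
        simp only [List.length_cons]
        push_cast
        omega

-- the trues-comprehension of a suffix segment, as shifted relative true indices
theorem trues_spec (seg pre : List (Option Bool)) :
    (PySem.List.pyRange (pre.length : Int) ((pre.length : Int) + seg.length)).filter
      (fun j => PySem.List.pyGetD (pre ++ seg) j none == some true)
      = (trueIdxN seg).map (fun j : Nat => (pre.length : Int) + (j : Int)) := by
  induction seg generalizing pre with
  | nil => simp [PySem.List.pyRange_one_eq_nil, trueIdxN]
  | cons s t ih =>
      have hcons : PySem.List.pyRange (pre.length : Int) ((pre.length : Int) + (s :: t).length)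
          = (pre.length : Int) :: PySem.List.pyRange ((pre.length : Int) + 1)
              ((pre.length : Int) + (s :: t).length) := by
        apply PySem.List.pyRange_one_cons
        simp only [List.length_cons]
        push_cast
        omega
      have hget : PySem.List.pyGetD (pre ++ s :: t) (pre.length : Int) none = s := by
        rw [PySem.List.pyGetD_natCast]
        simp [List.getD]
      have hlen1 : (((pre ++ [s]).length : Int)) = (pre.length : Int) + 1 := by simp
      have htail : PySem.List.pyRange ((pre.length : Int) + 1) ((pre.length : Int) + (s :: t).length)
          = PySem.List.pyRange (((pre ++ [s]).length : Int))
              (((pre ++ [s]).length : Int) + t.length) := by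
        rw [hlen1]
        congr 1
        simp only [List.length_cons]
        push_cast
        ring
      have hfun : (fun j => PySem.List.pyGetD (pre ++ s :: t) j none == some true)
          = (fun j => PySem.List.pyGetD ((pre ++ [s]) ++ t) j none == some true) := by
        funext j
        rw [show pre ++ s :: t = (pre ++ [s]) ++ t from by simp]
      rw [hcons, List.filter_cons, hget, htail, hfun, ih (pre ++ [s])]
      rw [show trueIdxN (s :: t) = (if s = some true then [0] else []) ++ (trueIdxN t).map (· + 1)
        from rfl]
      have hmap : (trueIdxN t).map (fun j : Nat => (((pre ++ [s]).length : Int)) + (j : Int))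
          = (trueIdxN t).map (fun j : Nat => (pre.length : Int) + (((j + 1 : Nat)) : Int)) := by
        apply List.map_congr_left
        intro j hj
        rw [hlen1]
        push_cast
        ring
      rw [hmap]
      by_cases hs : s = some true
      · rw [if_pos (by simp [hs]), if_pos hs]
        simp only [List.singleton_append, List.map_cons, List.map_map]
        congr 1
      · rw [if_neg (by simp [hs]), if_neg hs]
        simp only [List.nil_append, List.map_map]
        simp [Function.comp_def]

-- the emit of a suffix segment is that segment's optional block
theorem emit_spec (pre seg : List (Option Bool)) :
    pvEmitB (pre ++ seg) ((pre.length : Int) - 1) ((pre.length : Int) + seg.length)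
      = optB seg (pre.length : Int) := by
  have h1 : ((pre.length : Int)) - 1 + 1 = (pre.length : Int) := by ring
  simp only [pvEmitB, h1, trues_spec seg pre, List.getLast?_map, optB, lastT]
  cases hj : (trueIdxN seg).getLast? with
  | none => simp
  | some j => simp

-- ===== B-side bridge: the port's fold equals goB =====
theorem bridgeB (status : List (Option Bool)) (bounds : List Int) (blocks0 : List (Int × Int)) :
    (PySem.List.pyRange ((bounds.length : Int) - 2) (-1) (-1)).foldl
      (fun blocks k =>
        blocks ++ pvEmitB status (PySem.List.pyGetD bounds k 0)
          (PySem.List.pyGetD bounds (k + 1) 0)) blocks0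
      = blocks0 ++ goB status bounds := by
  induction bounds using List.reverseRecOn generalizing blocks0 with
  | nil => simp [goB]
  | append_singleton u a ih =>
      cases u with
      | nil =>
          have : ((([] : List Int) ++ [a]).length : Int) - 2 = -1 := by simp
          rw [this, PySem.List.pyRange_neg_one_eq_nil (by omega)]
          simp [goB]
      | cons b u' =>
          have hu : (b :: u') ≠ ([] : List Int) := by simp
          have hlen : (((b :: u' ++ [a]).length : Int)) - 2 = ((b :: u').length : Int) - 1 := by
            simp
            omega
          rw [hlen, PySem.List.pyRange_neg_one_cons
            (show (-1 : Int) < ((b :: u').length : Int) - 1 by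
              simp only [List.length_cons]; push_cast; omega), List.foldl_cons,
            show ((b :: u').length : Int) - 1 - 1 = ((b :: u').length : Int) - 2 from by ring]
          have h0 : (0 : Int) ≤ ((b :: u').length : Int) - 1 := by
            simp only [List.length_cons]
            push_cast
            omega
          have hg1 : PySem.List.pyGetD (b :: u' ++ [a]) (((b :: u').length : Int) - 1) 0
              = (b :: u').getLast hu := by
            rw [show (((b :: u').length : Int) - 1) = (((b :: u').length - 1 : Nat) : Int)
              from by push_cast [Nat.cast_sub (by simp : 1 ≤ (b :: u').length)]; ring]
            rw [PySem.List.pyGetD_natCast]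
            rw [show (b :: u' ++ [a]) = (b :: u') ++ [a] from rfl]
            rw [List.getD, List.getElem?_append_left (by simp)]
            rw [List.getLast_eq_getElem]
            simp
            rfl
          have hg2 : PySem.List.pyGetD (b :: u' ++ [a]) ((((b :: u').length : Int) - 1) + 1) 0
              = a := by
            rw [show ((((b :: u').length : Int) - 1) + 1) = (((b :: u').length : Nat) : Int)
              from by ring]
            rw [PySem.List.pyGetD_natCast]
            rw [show (b :: u' ++ [a]) = (b :: u') ++ [a] from rfl]
            simp [List.getD]
          rw [hg1, hg2]
          have hcong : (PySem.List.pyRange (((b :: u').length : Int) - 2) (-1) (-1)).foldl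
              (fun blocks k => blocks ++ pvEmitB status (PySem.List.pyGetD (b :: u' ++ [a]) k 0)
                (PySem.List.pyGetD (b :: u' ++ [a]) (k + 1) 0))
              (blocks0 ++ pvEmitB status ((b :: u').getLast hu) a)
              = (PySem.List.pyRange (((b :: u').length : Int) - 2) (-1) (-1)).foldl
              (fun blocks k => blocks ++ pvEmitB status (PySem.List.pyGetD (b :: u') k 0)
                (PySem.List.pyGetD (b :: u') (k + 1) 0))
              (blocks0 ++ pvEmitB status ((b :: u').getLast hu) a) := by
            apply PySem.List.foldl_congr_mem
            intro acc k hk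
            rw [PySem.List.mem_pyRange_neg_one] at hk
            have hk0 : 0 ≤ k := by omega
            have hL : ((b :: u' ++ [a]).length : Int) = ((b :: u').length : Int) + 1 := by
              simp
            have e1 : PySem.List.pyGetD (b :: u' ++ [a]) k 0
                = PySem.List.pyGetD (b :: u') k 0 :=
              pvGetD_append_lt (b :: u') [a] 0 k hk0 (by omega)
            have e2 : PySem.List.pyGetD (b :: u' ++ [a]) (k + 1) 0
                = PySem.List.pyGetD (b :: u') (k + 1) 0 :=
              pvGetD_append_lt (b :: u') [a] 0 (k + 1) (by omega) (by omega)
            rw [e1, e2]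
          rw [hcong, ih]
          rw [show (b :: u' ++ [a]) = (b :: u') ++ [a] from rfl,
              goB_append_last status (b :: u') hu a]
          rw [List.append_assoc]

-- if a list contains `some false`, split it at the LAST occurrence
theorem lastFalseSplit (l : List (Option Bool)) (h : some false ∈ l) :
    ∃ l1 l2, l = l1 ++ some false :: l2 ∧ some false ∉ l2 := by
  induction l using List.reverseRecOn with
  | nil => simp at h
  | append_singleton u a ih =>
      by_cases ha : a = some false
      · exact ⟨u, [], by simp [ha], by simp⟩
      · have hu : some false ∈ u := by
          rcases List.mem_append.mp h with h1 | h2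
          · exact h1
          · simp at h2
            exact absurd h2.symm ha
        obtain ⟨l1, l2, heq, hnf⟩ := ih hu
        refine ⟨l1, l2 ++ [a], by simp [heq], ?_⟩
        intro hm
        rcases List.mem_append.mp hm with h1 | h2
        · exact hnf h1
        · simp at h2
          exact ha h2.symm

-- no-False case of the main equivalence
theorem caseNoFalse (l : List (Option Bool)) (h : some false ∉ l) : Ares l = Bres l := by
  unfold Ares Bres
  rw [goA_noFalse l 0 [] h]
  have hb : goB l ((-1 : Int) :: fIdxFrom l 0 ++ [(l.length : Int)])
      = pvEmitB l (-1) (l.length : Int) := by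
    rw [fIdxFrom_noFalse l 0 h]
    rfl
  have he := emit_spec [] l
  simp only [List.nil_append, List.length_nil, Nat.cast_zero, zero_sub, zero_add] at he
  rw [hb, he]
  unfold finA optB
  cases hj : lastT l with
  | none => simp
  | some j =>
      simp
      omega

-- the split case, A side
theorem Ares_split (l1 l2 : List (Option Bool)) (hnF : some false ∉ l2) :
    Ares (l1 ++ some false :: l2) = optB l2 ((l1.length : Int) + 1) ++ Ares l1 := by
  unfold Ares
  rw [goA_append]
  simp only [zero_add]
  rw [show goA (some false :: l2) (l1.length : Int) ([], none)
      = pvStepA (l1.length : Int) (goA l2 ((l1.length : Int) + 1) ([], none)) (some false)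
      from rfl]
  rw [goA_noFalse l2 _ [] hnF]
  have hstep : pvStepA (l1.length : Int)
      ([], (lastT l2).map (fun j : Nat => (l1.length : Int) + 1 + (j : Int) + 1)) (some false)
      = (optB l2 ((l1.length : Int) + 1), none) := by
    cases hj : lastT l2 <;> simp [pvStepA, optB, hj]
  rw [hstep, goA_acc, finA_append]

theorem goB_concat2 (status : List (Option Bool)) (u : List Int) (p a : Int) :
    goB status ((u ++ [p]) ++ [a]) = pvEmitB status p a ++ goB status (u ++ [p]) := by
  rw [goB_append_last status (u ++ [p]) (by simp) a, List.getLast_concat]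

-- the split case, B side
theorem Bres_split (l1 l2 : List (Option Bool)) (hnF : some false ∉ l2) :
    Bres (l1 ++ some false :: l2) = optB l2 ((l1.length : Int) + 1) ++ Bres l1 := by
  unfold Bres
  have hf : fIdxFrom (l1 ++ some false :: l2) 0 = fIdxFrom l1 0 ++ [(l1.length : Int)] := by
    rw [fIdxFrom_append, fIdxFrom_cons]
    simp [fIdxFrom_noFalse l2 _ hnF]
  rw [hf]
  show goB (l1 ++ some false :: l2)
      ((((-1 : Int) :: fIdxFrom l1 0) ++ [(l1.length : Int)])
        ++ [(((l1 ++ some false :: l2).length : Int))]) = _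
  rw [goB_concat2]
  have hn : (((l1 ++ some false :: l2).length : Int))
      = (l1.length : Int) + 1 + (l2.length : Int) := by
    simp
    ring
  rw [hn]
  have hemit := emit_spec (l1 ++ [some false]) l2
  rw [show (((l1 ++ [some false]).length : Int)) = (l1.length : Int) + 1 from by simp,
      List.append_assoc, List.singleton_append,
      show ((l1.length : Int)) + 1 - 1 = (l1.length : Int) from by ring] at hemit
  rw [hemit]
  have hrest : goB (l1 ++ some false :: l2)
        (((-1 : Int) :: fIdxFrom l1 0) ++ [(l1.length : Int)])
      = goB l1 (((-1 : Int) :: fIdxFrom l1 0) ++ [(l1.length : Int)]) := by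
    apply goB_restrict
    intro x hx
    rcases List.mem_append.mp hx with h1 | h2
    · rcases List.mem_cons.mp h1 with h5 | h6
      · omega
      · have := fIdxFrom_mem l1 0 x h6
        omega
    · simp at h2
      omega
  rw [hrest]

-- ===== the main equivalence on status lists =====
theorem mainEq : ∀ n (l : List (Option Bool)), l.length ≤ n → Ares l = Bres l := by
  intro n
  induction n with
  | zero =>
      intro l hl
      have hnil : l = [] := List.eq_nil_of_length_eq_zero (by omega)
      subst hnil
      exact caseNoFalse [] (by simp)
  | succ n ih =>
      intro l hl
      by_cases hF : some false ∈ l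
      · obtain ⟨l1, l2, heq, hnF⟩ := lastFalseSplit l hF
        subst heq
        rw [Ares_split l1 l2 hnF, Bres_split l1 l2 hnF,
            ih l1 (by simp at hl; omega)]
      · exact caseNoFalse l hF

-- ===== VERDICT (by name: the statement is the Claim_ definition above) =====
theorem get_blocks_spec : Claim_equal_get_blocks := by
  intro min_digit chars _hdom
  show get_blocks min_digit chars = get_blocks_alt min_digit chars
  have hA : get_blocks min_digit chars = Ares (statusOf min_digit chars) := by
    show finA ((PySem.List.pyRange (((statusOf min_digit chars).length : Int) - 1) (-1) (-1)).foldl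
        (fun st idx => pvStepA idx st (PySem.List.pyGetD (statusOf min_digit chars) idx none))
        ([], none)) = Ares (statusOf min_digit chars)
    rw [bridgeA]
    rfl
  have hB : get_blocks_alt min_digit chars = Bres (statusOf min_digit chars) := by
    show (PySem.List.pyRange (((((-1 : Int) :: fIdxFrom (statusOf min_digit chars) 0
          ++ [((statusOf min_digit chars).length : Int)]).length : Int)) - 2) (-1) (-1)).foldl
        (fun blocks k =>
          blocks ++ pvEmitB (statusOf min_digit chars)
            (PySem.List.pyGetD ((-1 : Int) :: fIdxFrom (statusOf min_digit chars) 0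
              ++ [((statusOf min_digit chars).length : Int)]) k 0)
            (PySem.List.pyGetD ((-1 : Int) :: fIdxFrom (statusOf min_digit chars) 0
              ++ [((statusOf min_digit chars).length : Int)]) (k + 1) 0)) []
        = Bres (statusOf min_digit chars)
    rw [bridgeB]
    rfl
  rw [hA, hB]
  exact mainEq (statusOf min_digit chars).length _ (le_refl _)
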